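-- pv_equiv track=rewrite | github.com/nelsonrg/advent-of-code | 2023/day_01/day_1.py | part_2
-- ===== SOURCE A (Python) =====
-- def part_2(x):
--     numbers = {
--         "one": 1,
--         "two": 2,
--         "three": 3,
--         "four": 4,
--         "five": 5,
--         "six": 6,
--         "seven": 7,
--         "eight": 8,
--         "nine": 9
--     }
--     count = 0
--     for y in x:
--         digits = []
--         for i in range(len(y)):
--             # check if normal digit
--             if y[i].isdigit():
--                 digits.append(int(y[i]))
--                 continue
--             # check if a word digit
--             for num in numbers:
--                 if num == y[i:i+len(num)]:
--                     digits.append(numbers[num])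
--         count += 10*digits[0] + digits[-1]
--     return count
-- ===== SOURCE B (Python) =====
-- def part_2(x):
--     numbers = {
--         "one": 1,
--         "two": 2,
--         "three": 3,
--         "four": 4,
--         "five": 5,
--         "six": 6,
--         "seven": 7,
--         "eight": 8,
--         "nine": 9
--     }
--
--     def value_at(y, i):
--         # digit character, else first number word starting at i, else None
--         if y[i].isdigit():
--             return int(y[i])
--         for num, v in numbers.items():
--             if y[i:i+len(num)] == num:
--                 return v
--         return None
--
--     total = 0
--     for y in x:
--         first = next(v for i in range(len(y)) if (v := value_at(y, i)) is not None)
--         last = next(v for i in reversed(range(len(y))) if (v := value_at(y, i)) is not None)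
--         total += 10 * first + last
--     return total
-- ===== Notes on version B (the rewrite author's own statement) =====
-- stated objective: alternative
-- what changed: B replaces A's per-line accumulation of every digit value into a list with two directional scans that stop at the first match: a left-to-right scan for the first value and a right-to-left scan for the last, using an early-returning value_at helper instead of appending all matching words.
-- outside the precondition, e.g. on part_2(['abc']): A raises IndexError, B raises StopIteration
import Mathlib
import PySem

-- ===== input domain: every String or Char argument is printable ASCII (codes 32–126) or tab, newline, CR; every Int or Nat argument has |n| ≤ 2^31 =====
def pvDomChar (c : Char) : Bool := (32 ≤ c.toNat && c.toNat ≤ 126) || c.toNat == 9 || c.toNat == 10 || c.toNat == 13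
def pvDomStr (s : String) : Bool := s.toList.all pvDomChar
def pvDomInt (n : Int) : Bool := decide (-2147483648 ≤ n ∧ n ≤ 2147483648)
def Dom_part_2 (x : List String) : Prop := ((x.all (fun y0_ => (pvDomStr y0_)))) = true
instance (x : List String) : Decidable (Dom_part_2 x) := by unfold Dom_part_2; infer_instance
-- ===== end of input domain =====

-- B replaces A's per-line list of all digit values with two early-stopping directional scans
-- (first value left-to-right, last value right-to-left); an 'alternative' rewrite, not claimed faster.

-- the number-word dictionary, identical in both Python sources (keys ported as Char lists,
-- matching the List Char view of the line used by both ports)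
def numbersList : List (List Char × Int) :=
  [(['o','n','e'], 1), (['t','w','o'], 2), (['t','h','r','e','e'], 3), (['f','o','u','r'], 4),
   (['f','i','v','e'], 5), (['s','i','x'], 6), (['s','e','v','e','n'], 7),
   (['e','i','g','h','t'], 8), (['n','i','n','e'], 9)]

-- ===== PORT A =====
-- inner loop of A: build the list of all digit values of line `cs`
-- (y[i] ported as getD — i ranges over range(len(y)), so always in range;
--  the slice y[i:i+len(num)] with 0 ≤ i is exactly (cs.drop i).take len)
def digitsOf (cs : List Char) : List Int :=
  (List.range cs.length).foldl (fun digits i =>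
    if (cs.getD i ' ').isDigit then
      digits ++ [((cs.getD i ' ').toNat : Int) - 48]
    else
      numbersList.foldl (fun digits p =>
        if p.1 = (cs.drop i).take p.1.length then digits ++ [p.2] else digits)
        digits) []

-- digits[0] / digits[-1] raise IndexError when digits = []; Pre_part_2 excludes exactly
-- those inputs, so headD/getLastD with default 0 are only reached inside Pre_ on nonempty lists
def part_2 (x : List String) : Int :=
  x.foldl (fun count y =>
    let digits := digitsOf y.toList
    count + (10 * digits.headD 0 + digits.getLastD 0)) 0

-- ===== PORT B =====
-- B's value_at: digit char, else first number word starting at i (early return), else None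
def valueAt (cs : List Char) (i : Nat) : Option Int :=
  if (cs.getD i ' ').isDigit then some (((cs.getD i ' ').toNat : Int) - 48)
  else
    numbersList.findSome? (fun p =>
      if p.1 = (cs.drop i).take p.1.length then some p.2 else none)

-- B's `next(...)` raises StopIteration when no position matches; excluded by Pre_part_2,
-- so the default 0 of getD is only reached outside Pre_
def part_2_alt (x : List String) : Int :=
  x.foldl (fun total y =>
    let cs := y.toList
    let first := ((List.range cs.length).findSome? (valueAt cs)).getD 0
    let last := ((List.range cs.length).reverse.findSome? (valueAt cs)).getD 0
    total + (10 * first + last)) 0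

-- ===== PRECONDITION & SPEC =====
-- Pre_ excludes inputs containing a line with neither a digit character nor a number word,
-- on which A raises IndexError (and B raises StopIteration).
def lineHasValue (y : String) : Bool :=
  y.toList.any Char.isDigit || numbersList.any (fun p => decide (p.1 <:+: y.toList))

def Pre_part_2 (x : List String) : Prop := ∀ y ∈ x, lineHasValue y = true
instance (x : List String) : Decidable (Pre_part_2 x) := by unfold Pre_part_2; infer_instance

def pvWitness_part_2 : List String := ["two1nine", "eightwothree"]

def Spec_part_2 (x : List String) (out : Int) : Prop := out = part_2_alt x
instance (x : List String) (out : Int) : Decidable (Spec_part_2 x out) := by unfold Spec_part_2; infer_instance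

-- ===== CLAIM (what is proved, stated in full; the proofs are below) =====
def Claim_equal_part_2 : Prop := ∀ (x : List String), Dom_part_2 x → Pre_part_2 x → Spec_part_2 x (part_2 x)

-- ===== LEMMAS AND PROOFS =====

-- if two words both occur at the head of l, the shorter is a prefix of the longer
theorem no_two (l w1 w2 : List Char) (h1 : w1 = l.take w1.length)
    (h2 : w2 = l.take w2.length) (hle : w1.length ≤ w2.length) :
    w1 = w2.take w1.length := by
  rw [h2, List.take_take, min_eq_left hle, ← h1]

-- no two distinct number words match at the same position
theorem words_excl (l : List Char) :
    ∀ p ∈ numbersList, ∀ q ∈ numbersList, p ≠ q →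
      ¬(p.1 = l.take p.1.length ∧ q.1 = l.take q.1.length) := by
  intro p hp q hq hne ⟨h1, h2⟩
  fin_cases hp <;> fin_cases hq <;>
    first
      | exact hne rfl
      | exact absurd (no_two l _ _ h1 h2 (by decide)) (by decide)
      | exact absurd (no_two l _ _ h2 h1 (by decide)) (by decide)

-- with at most one match in a duplicate-free list, collecting all matches (A)
-- yields exactly the first match (B) as a list
theorem uniq_filter_findSome {α β : Type} (L : List (α × β)) (P : α × β → Prop)
    [DecidablePred P] (hnd : L.Nodup)
    (hx : ∀ p ∈ L, ∀ q ∈ L, p ≠ q → ¬(P p ∧ P q)) :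
    (L.filter (fun p => decide (P p))).map Prod.snd =
    (L.findSome? (fun p => if P p then some p.2 else none)).toList := by
  induction L with
  | nil => simp
  | cons p L ih =>
    rw [List.nodup_cons] at hnd
    by_cases hp : P p
    · have hf : L.filter (fun q => decide (P q)) = [] := by
        rw [List.filter_eq_nil_iff]
        intro q hq
        simp only [decide_eq_true_eq]
        intro hPq
        exact hx p (List.mem_cons_self ..) q (List.mem_cons_of_mem _ hq)
          (fun h => hnd.1 (h ▸ hq)) ⟨hp, hPq⟩
      simp [hp, hf]
    · simp [hp]
      exact ih hnd.2
        (fun a ha b hb hne => hx a (List.mem_cons_of_mem _ ha) b (List.mem_cons_of_mem _ hb) hne)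

theorem word_contrib (l : List Char) :
    ((numbersList.filter (fun p => decide (p.1 = l.take p.1.length))).map Prod.snd) =
    (numbersList.findSome? (fun p =>
      if p.1 = l.take p.1.length then some p.2 else none)).toList :=
  uniq_filter_findSome numbersList (fun p => p.1 = l.take p.1.length)
    (by decide) (words_excl l)

-- per position, A's appended values are exactly B's optional value as a list
theorem contrib_eq (cs : List Char) (i : Nat) (acc : List Int) :
    (if (cs.getD i ' ').isDigit then
       acc ++ [((cs.getD i ' ').toNat : Int) - 48]
     else
       numbersList.foldl (fun digits p =>
         if p.1 = (cs.drop i).take p.1.length then digits ++ [p.2] else digits)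
         acc) = acc ++ (valueAt cs i).toList := by
  unfold valueAt
  by_cases hd : (cs.getD i ' ').isDigit
  · rw [if_pos hd, if_pos hd]; simp
  · rw [if_neg hd, if_neg hd]
    rw [PySem.List.foldl_append_ite (p := fun p : List Char × Int =>
          p.1 = (cs.drop i).take p.1.length) (f := Prod.snd)]
    rw [word_contrib]

-- A's digits list is the filter-map of B's value_at over all positions
theorem digitsOf_eq (cs : List Char) :
    digitsOf cs = (List.range cs.length).flatMap (fun i => (valueAt cs i).toList) := by
  unfold digitsOf
  rw [List.foldl_ext _ (fun (digits : List Int) i => digits ++ (valueAt cs i).toList) []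
    (fun acc i _ => contrib_eq cs i acc)]
  rw [PySem.List.foldl_append_eq_flatMap]
  simp

-- head of the collected option lists = first early-stopping scan
theorem head?_flatMap_toList {α : Type} (xs : List Nat) (g : Nat → Option α) :
    (xs.flatMap (fun i => (g i).toList)).head? = xs.findSome? g := by
  induction xs with
  | nil => simp
  | cons x xs ih =>
    cases hx : g x with
    | none => simp [hx, ih]
    | some v => simp [hx]

theorem getLast?_flatMap_toList {α : Type} (xs : List Nat) (g : Nat → Option α) :
    (xs.flatMap (fun i => (g i).toList)).getLast? = xs.reverse.findSome? g := by
  rw [List.getLast?_eq_head?_reverse, List.reverse_flatMap]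
  simp only [Function.comp_def]
  have h : ∀ o : Option α, o.toList.reverse = o.toList := fun o => by cases o <;> rfl
  simp only [h]
  exact head?_flatMap_toList _ _

theorem line_eq (y : String) :
    10 * (digitsOf y.toList).headD 0 + (digitsOf y.toList).getLastD 0 =
    10 * ((List.range y.toList.length).findSome? (valueAt y.toList)).getD 0 +
      ((List.range y.toList.length).reverse.findSome? (valueAt y.toList)).getD 0 := by
  rw [List.headD_eq_head?_getD, List.getLastD_eq_getLast?, digitsOf_eq,
      head?_flatMap_toList, getLast?_flatMap_toList]

-- ===== VERDICT (by name: the statement is the Claim_ definition above) =====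
theorem part_2_spec : Claim_equal_part_2 := by
  intro x _ _
  unfold Spec_part_2 part_2 part_2_alt
  exact List.foldl_ext _ _ 0 (fun c y _ => by
    simp only []
    rw [Int.add_right_inj]
    exact line_eq y)
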